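-- pv_equiv track=rewrite | github.com/hit9/bitproto | editors/language_server/bitproto_language_server/__init__.py | _util_find_dotted_identifier_backward
-- ===== SOURCE A (Python) =====
-- def is_valid_identifier_char(char: str):
--     return char in "ABCDEFGHIJKLMNOPQRSTUVWXYZabcdefghijklmnopqrstuvwxyz0123456789_."
--
-- def _util_find_dotted_identifier_backward(current_line: str, col: int):
--     """Find the `dotted_identifier` around current col.
--     Where `col` starting from `1`.
--     e.g.
--         '    base.BaseMessage'
--                      ^
--         => 'base.Base'
--     """
--     # Search backward for the first non [A-Za-z0-9_\.] character
--     # (e.g. whitespaces, `=`, newlines etc)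
--     stack = []
--     k = min(col - 1, len(current_line) - 1)
--     while k >= 0:
--         if not is_valid_identifier_char(current_line[k]):
--             break
--         stack.append(current_line[k])
--         k -= 1
--     stack.reverse()
--     return "".join(stack)
-- ===== SOURCE B (Python) =====
-- IDENT_CHARS = frozenset("ABCDEFGHIJKLMNOPQRSTUVWXYZabcdefghijklmnopqrstuvwxyz0123456789_.")
--
-- def _util_find_dotted_identifier_backward(current_line: str, col: int):
--     """Find the dotted identifier ending at column `col` (1-based).
--
--     One forward pass over the prefix: remember the position just after the
--     last non-identifier character, then return the trailing slice.
--     """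
--     end = min(col, len(current_line))
--     if end <= 0:
--         return ""
--     prefix = current_line[:end]
--     start = 0
--     for i, ch in enumerate(prefix):
--         if ch not in IDENT_CHARS:
--             start = i + 1
--     return prefix[start:]
-- ===== Notes on version B (the rewrite author's own statement) =====
-- stated objective: idiomatic
-- what changed: Replaces the backward stack-push-then-reverse while loop by a single forward pass over the clamped prefix that records the position after the last non-identifier character and returns the trailing slice (no per-char list building/reversal/join).
import Mathlib
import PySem

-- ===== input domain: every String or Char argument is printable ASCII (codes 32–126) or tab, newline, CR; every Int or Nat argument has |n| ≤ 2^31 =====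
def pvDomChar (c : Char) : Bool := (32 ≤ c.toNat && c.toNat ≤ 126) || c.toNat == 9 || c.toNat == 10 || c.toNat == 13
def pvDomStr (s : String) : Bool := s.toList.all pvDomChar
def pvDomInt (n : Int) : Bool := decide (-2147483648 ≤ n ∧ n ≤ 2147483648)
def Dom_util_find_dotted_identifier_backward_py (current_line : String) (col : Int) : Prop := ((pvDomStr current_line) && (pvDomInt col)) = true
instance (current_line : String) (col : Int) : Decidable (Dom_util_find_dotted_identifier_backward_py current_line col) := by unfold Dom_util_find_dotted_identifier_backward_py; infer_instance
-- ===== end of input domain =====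

-- B replaces A's backward stack-and-reverse while loop by one forward pass over the
-- clamped prefix that tracks the position after the last non-identifier character (idiomatic).

-- ===== PORT A =====
def isValidIdentifierChar (c : Char) : Bool :=
  ("ABCDEFGHIJKLMNOPQRSTUVWXYZabcdefghijklmnopqrstuvwxyz0123456789_.".toList).contains c

-- the `while k >= 0` loop of A, descending index k; cs.getD k ' ' is exact since k < cs.length
def pvALoop (cs : List Char) : Nat → List Char → List Char
  | 0, stack =>
      if isValidIdentifierChar (cs.getD 0 ' ') then stack ++ [cs.getD 0 ' '] else stack
  | k+1, stack =>
      if isValidIdentifierChar (cs.getD (k+1) ' ') then pvALoop cs k (stack ++ [cs.getD (k+1) ' '])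
      else stack

def util_find_dotted_identifier_backward_py (current_line : String) (col : Int) : String :=
  let cs := current_line.toList
  let k : Int := min (col - 1) ((cs.length : Int) - 1)
  -- if k < 0 the while-loop body never runs
  let stack : List Char := if k < 0 then [] else pvALoop cs k.toNat []
  String.mk stack.reverse

-- ===== PORT B =====
def pvIdentSet : PySem.Set Char :=
  PySem.Set.ofList "ABCDEFGHIJKLMNOPQRSTUVWXYZabcdefghijklmnopqrstuvwxyz0123456789_.".toList

def util_find_dotted_identifier_backward_py_alt (current_line : String) (col : Int) : String :=
  let cs := current_line.toList
  let e : Int := min col (cs.length : Int)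
  if e ≤ 0 then "" else
    let pre := cs.take e.toNat
    -- `for i, ch in enumerate(prefix)` as a fold carrying (i, start)
    let r := pre.foldl
      (fun (st : Nat × Nat) ch => (st.1 + 1, if ¬ PySem.Set.contains pvIdentSet ch then st.1 + 1 else st.2))
      (0, 0)
    String.mk (pre.drop r.2)

-- ===== PRECONDITION & SPEC =====
def Spec_util_find_dotted_identifier_backward_py (current_line : String) (col : Int) (out : String) : Prop := out = util_find_dotted_identifier_backward_py_alt current_line col
instance (current_line : String) (col : Int) (out : String) : Decidable (Spec_util_find_dotted_identifier_backward_py current_line col out) := by unfold Spec_util_find_dotted_identifier_backward_py; infer_instance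

-- ===== CLAIM (what is proved, stated in full; the proofs are below) =====
def Claim_equal_util_find_dotted_identifier_backward_py : Prop := ∀ (current_line : String) (col : Int), Dom_util_find_dotted_identifier_backward_py current_line col → Spec_util_find_dotted_identifier_backward_py current_line col (util_find_dotted_identifier_backward_py current_line col)

-- ===== LEMMAS AND PROOFS =====

-- B's membership test agrees with A's character test
lemma contains_identSet (c : Char) :
    PySem.Set.contains pvIdentSet c = isValidIdentifierChar c := by
  rw [Bool.eq_iff_iff]
  simp [pvIdentSet, isValidIdentifierChar, PySem.Set.mem_ofList]

-- B's fold step, with the membership test rewritten to A's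
def pvStep (st : Nat × Nat) (ch : Char) : Nat × Nat :=
  (st.1 + 1, if isValidIdentifierChar ch then st.2 else st.1 + 1)

lemma step_eq :
    (fun (st : Nat × Nat) ch =>
        (st.1 + 1, if ¬ PySem.Set.contains pvIdentSet ch then st.1 + 1 else st.2)) = pvStep := by
  funext st ch
  simp only [pvStep, ite_not, contains_identSet]

-- A's loop collects, in backward order, the maximal valid run ending at index k
lemma pvALoop_eq (cs : List Char) (k : Nat) (hk : k < cs.length) (stack : List Char) :
    pvALoop cs k stack = stack ++ ((cs.take (k+1)).reverse.takeWhile isValidIdentifierChar) := by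
  induction k generalizing stack with
  | zero =>
      cases cs with
      | nil => simp at hk
      | cons c t =>
          rw [pvALoop]
          by_cases hv : isValidIdentifierChar c <;>
            simp [List.getD, List.takeWhile, hv]
  | succ k ih =>
      have hk' : k < cs.length := Nat.lt_of_succ_lt hk
      have hget : cs.getD (k+1) ' ' = cs[k+1] := by
        simp [List.getD, List.getElem?_eq_getElem hk]
      have htake : cs.take (k+1+1) = cs.take (k+1) ++ [cs[k+1]] := by
        rw [List.take_succ, List.getElem?_eq_getElem hk]
        simp
      rw [pvALoop, hget, htake]
      simp only [List.reverse_append, List.reverse_cons, List.reverse_nil, List.nil_append,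
        List.singleton_append, List.takeWhile_cons]
      by_cases hv : isValidIdentifierChar cs[k+1]
      · rw [if_pos hv, ih hk']
        simp [hv]
      · rw [if_neg hv]
        simp [hv]

-- B's forward fold: the counter is the length, and dropping at `start` leaves the
-- maximal trailing valid run
lemma pvBFold_eq (p : List Char) :
    (p.foldl pvStep (0, 0)).1 = p.length ∧
    (p.foldl pvStep (0, 0)).2 ≤ p.length ∧
    p.drop (p.foldl pvStep (0, 0)).2 = (p.reverse.takeWhile isValidIdentifierChar).reverse := by
  induction p using List.reverseRecOn with
  | nil => simp
  | append_singleton p c ih =>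
      obtain ⟨h1, h2, h3⟩ := ih
      rw [List.foldl_append, List.foldl_cons, List.foldl_nil]
      by_cases hv : isValidIdentifierChar c
      · refine ⟨by simp [pvStep, h1], ?_, ?_⟩
        · simp only [pvStep, hv, if_pos]
          calc _ ≤ p.length := h2
            _ ≤ (p ++ [c]).length := by simp
        · simp only [pvStep, hv, if_pos]
          rw [List.drop_append_of_le_length h2, h3]
          simp [hv]
      · refine ⟨by simp [pvStep, h1], ?_, ?_⟩
        · simp [pvStep, hv, h1]
        · simp only [pvStep, hv, if_neg, Bool.not_eq_true, h1]
          rw [List.drop_eq_nil_of_le (by simp)]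
          simp [hv]

-- ===== VERDICT (by name: the statement is the Claim_ definition above) =====
theorem util_find_dotted_identifier_backward_py_spec : Claim_equal_util_find_dotted_identifier_backward_py := by
  intro current_line col _
  unfold Spec_util_find_dotted_identifier_backward_py
  unfold util_find_dotted_identifier_backward_py util_find_dotted_identifier_backward_py_alt
  rw [step_eq]
  set cs := current_line.toList with hcs
  dsimp only
  by_cases he : min col (cs.length : Int) ≤ 0
  · have hk : min (col - 1) ((cs.length : Int) - 1) < 0 := by omega
    simp only [if_pos he, if_pos hk, List.reverse_nil]
    rfl
  · have hk : ¬ min (col - 1) ((cs.length : Int) - 1) < 0 := by omega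
    rw [if_neg he, if_neg hk]
    have hlen : 0 < cs.length := by
      by_contra h
      have : (cs.length : Int) ≤ 0 := by omega
      omega
    have hkk : (min (col - 1) ((cs.length : Int) - 1)).toNat < cs.length := by omega
    have hn : (min (col - 1) ((cs.length : Int) - 1)).toNat + 1 = (min col (cs.length : Int)).toNat := by
      omega
    obtain ⟨_, _, h3⟩ := pvBFold_eq (cs.take (min col (cs.length : Int)).toNat)
    rw [pvALoop_eq cs _ hkk [], List.nil_append, hn, h3]
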